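-- pv_equiv track=rewrite | github.com/aalaasaeed/Appriori_Algorthim_From_Scratch | main.py | frequentSet_3
-- ===== SOURCE A (Python) =====
-- import itertools
--
-- def frequentSet_3(l2, records, minimum_support_count):
--     l2 = list(l2.keys())
--     L2 = sorted(list(set([item for t in l2 for item in t])))
--     L2 = list(itertools.combinations(L2, 3))
--     c3 = {}
--     l3 = {}
--     for iter1 in L2:
--         count = 0
--         for iter2 in records:
--             if sublist(iter1, iter2):
--                 count += 1
--         c3[iter1] = count
--     for key, value in c3.items():
--         if value >= minimum_support_count:
--             if check_subset_frequency(key, l2, 2):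
--                 l3[key] = value
--
--     return c3, l3
--
-- def sublist(lst1, lst2):
--     return set(lst1) <= set(lst2)
--
-- def check_subset_frequency(itemset, l, n):
--     if n > 1:
--         subsets = list(itertools.combinations(itemset, n))
--     else:
--         subsets = itemset
--     for iter1 in subsets:
--         if not iter1 in l:
--             return False
--     return True
-- ===== SOURCE B (Python) =====
-- import itertools
--
-- def frequentSet_3(l2, records, minimum_support_count):
--     keys = list(l2.keys())
--     items = sorted({x for t in keys for x in t})
--     item_set = set(items)
--     c3 = {t: 0 for t in itertools.combinations(items, 3)}
--     if len(items) >= 3:  # otherwise there are no candidate triples to count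
--         for rec in records:
--             present = sorted(set(rec) & item_set)
--             for t in itertools.combinations(present, 3):
--                 c3[t] += 1
--     key_set = set(keys)
--     l3 = {k: v for k, v in c3.items()
--           if v >= minimum_support_count
--           and all(p in key_set for p in itertools.combinations(k, 2))}
--     return c3, l3
-- ===== Notes on version B (the rewrite author's own statement) =====
-- stated objective: alternative
-- what changed: Inverted loops: instead of scanning all records once per candidate 3-itemset, B initialises a zero count for every candidate triple and makes a single pass over the records, incrementing the count of each 3-combination of a record's relevant items; the l3 pruning checks pairs against a prebuilt set of frequent pairs.
import Mathlib
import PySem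

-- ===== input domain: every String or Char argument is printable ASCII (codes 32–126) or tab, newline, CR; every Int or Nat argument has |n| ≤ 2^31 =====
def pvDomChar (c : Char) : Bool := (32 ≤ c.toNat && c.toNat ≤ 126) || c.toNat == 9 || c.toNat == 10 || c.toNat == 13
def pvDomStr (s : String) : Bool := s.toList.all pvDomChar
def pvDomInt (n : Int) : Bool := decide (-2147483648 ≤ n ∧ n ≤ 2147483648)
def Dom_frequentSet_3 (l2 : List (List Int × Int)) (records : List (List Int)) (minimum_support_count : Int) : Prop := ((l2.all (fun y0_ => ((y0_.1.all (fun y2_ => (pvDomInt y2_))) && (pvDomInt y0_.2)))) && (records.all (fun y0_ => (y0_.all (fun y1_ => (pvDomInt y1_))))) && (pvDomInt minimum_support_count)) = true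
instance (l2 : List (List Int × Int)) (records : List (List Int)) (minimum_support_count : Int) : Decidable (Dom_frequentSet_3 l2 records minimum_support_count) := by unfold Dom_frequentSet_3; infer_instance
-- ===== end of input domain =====

-- B inverts A's loops: one pass over the records incrementing the counts of each
-- record's own 3-combinations, instead of scanning all records per candidate triple.

-- ===== PORT A =====
def pySublist (lst1 lst2 : List Int) : Bool :=
  PySem.Set.issubset (PySem.Set.ofList lst1) (PySem.Set.ofList lst2)

-- A calls this helper only with n = 2, taking the n > 1 branch; the n ≤ 1 branch
-- (which would iterate the itemset's ints as "subsets") is untypable here and unreached.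
def checkSubsetFrequency (itemset : List Int) (l : List (List Int)) (n : Int) : Bool :=
  let subsets := PySem.List.combinations itemset n.toNat
  subsets.all (fun iter1 => l.contains iter1)

def frequentSet_3 (l2 : List (List Int × Int)) (records : List (List Int)) (minimum_support_count : Int) : (List (List Int × Int)) × (List (List Int × Int)) :=
  let l2k := l2.map Prod.fst
  let L2a := PySem.List.sorted (PySem.Set.ofList (l2k.flatMap (fun t => t))) (fun x => x)
  let L2 := PySem.List.combinations L2a 3
  let c3 : PySem.Dict (List Int) Int :=
    L2.foldl (fun c3 iter1 =>
      c3.insert iter1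
        (records.foldl (fun count iter2 => if pySublist iter1 iter2 then count + 1 else count) (0 : Int)))
      PySem.Dict.empty
  let l3 : PySem.Dict (List Int) Int :=
    c3.items.foldl (fun l3 kv =>
      if kv.2 ≥ minimum_support_count then
        if checkSubsetFrequency kv.1 l2k 2 then l3.insert kv.1 kv.2 else l3
      else l3) PySem.Dict.empty
  (c3.items, l3.items)

-- ===== PORT B =====
def frequentSet_3_alt (l2 : List (List Int × Int)) (records : List (List Int)) (minimum_support_count : Int) : (List (List Int × Int)) × (List (List Int × Int)) :=
  let keys := l2.map Prod.fst
  let items := PySem.List.sorted (PySem.Set.ofList (keys.flatMap (fun t => t))) (fun x => x)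
  let c3init : PySem.Dict (List Int) Int :=
    (PySem.List.combinations items 3).foldl (fun d t => d.insert t (0 : Int)) PySem.Dict.empty
  -- when there are fewer than 3 distinct items there are no candidate triples: skip the records
  let c3 : PySem.Dict (List Int) Int :=
    if 3 ≤ items.length then
      records.foldl (fun d rec =>
        (PySem.List.combinations
            (PySem.List.sorted (PySem.Set.inter (PySem.Set.ofList rec) items) (fun x => x)) 3).foldl
          (fun d t => d.modify t 0 (fun v => v + 1)) d) c3init
    else c3init
  let keySet : PySem.Set (List Int) := PySem.Set.ofList keys
  let l3 : PySem.Dict (List Int) Int :=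
    c3.items.foldl (fun d kv =>
      if decide (kv.2 ≥ minimum_support_count)
          && (PySem.List.combinations kv.1 2).all (fun p => PySem.Set.contains keySet p) then
        d.insert kv.1 kv.2
      else d) PySem.Dict.empty
  (c3.items, l3.items)

-- ===== PRECONDITION & SPEC =====
def Spec_frequentSet_3 (l2 : List (List Int × Int)) (records : List (List Int)) (minimum_support_count : Int) (out : (List (List Int × Int)) × (List (List Int × Int))) : Prop := out = frequentSet_3_alt l2 records minimum_support_count
instance (l2 : List (List Int × Int)) (records : List (List Int)) (minimum_support_count : Int) (out : (List (List Int × Int)) × (List (List Int × Int))) : Decidable (Spec_frequentSet_3 l2 records minimum_support_count out) := by unfold Spec_frequentSet_3; infer_instance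

-- ===== CLAIM (what is proved, stated in full; the proofs are below) =====
def Claim_equal_frequentSet_3 : Prop := ∀ (l2 : List (List Int × Int)) (records : List (List Int)) (minimum_support_count : Int), Dom_frequentSet_3 l2 records minimum_support_count → Spec_frequentSet_3 l2 records minimum_support_count (frequentSet_3 l2 records minimum_support_count)

-- ===== LEMMAS AND PROOFS =====

-- two strictly increasing lists related by ⊆ are related by Sublist
theorem pvSublistOfPairwiseLt (xs ys : List Int) (h1 : xs.Pairwise (· < ·))
    (h2 : ys.Pairwise (· < ·)) (h3 : ∀ a ∈ xs, a ∈ ys) : xs.Sublist ys := by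
  have hnd : xs.Nodup := h1.imp (fun h => ne_of_lt h)
  exact List.sublist_of_subperm_of_pairwise (hnd.subperm h3) h1 h2

theorem pvCombinationsNodup {α : Type} [DecidableEq α] (xs : List α) (r : Nat)
    (h : xs.Nodup) : (PySem.List.combinations xs r).Nodup := by
  induction xs generalizing r with
  | nil =>
    cases r with
    | zero => simp [PySem.List.combinations_zero]
    | succ r => simp [PySem.List.combinations_nil_succ]
  | cons x xs ih =>
    have hx : x ∉ xs := (List.nodup_cons.mp h).1
    have hxs : xs.Nodup := (List.nodup_cons.mp h).2
    cases r with
    | zero => simp [PySem.List.combinations_zero]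
    | succ r =>
      rw [PySem.List.combinations_cons_succ]
      apply List.Nodup.append
      · exact (ih r hxs).map (fun a b hab => by injection hab)
      · exact ih (r + 1) hxs
      · intro c hc1 hc2
        rcases List.mem_map.mp hc1 with ⟨c', _, rfl⟩
        have hsub := PySem.List.sublist_of_mem_combinations hc2
        exact hx (hsub.subset (by simp))

theorem pvInsertFoldGetD (L : List (List Int)) (g : List Int → Int)
    (d : PySem.Dict (List Int) Int) (t : List Int) :
    (L.foldl (fun d k => d.insert k (g k)) d).getD t 0
      = if t ∈ L then g t else d.getD t 0 := by
  induction L generalizing d with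
  | nil => simp
  | cons x L ih =>
    simp only [List.foldl_cons, ih]
    by_cases h : t ∈ L
    · simp [h]
    · by_cases hx : t = x
      · subst hx; simp [h, PySem.Dict.getD_insert_self]
      · simp [h, hx, PySem.Dict.getD_insert_of_ne _ _ _ hx]

-- the set of relevant items of a record, as B computes it
theorem pvMemPresent (items rec : List Int) (x : Int) :
    x ∈ PySem.List.sorted (PySem.Set.inter (PySem.Set.ofList rec) items) (fun x => x)
      ↔ x ∈ rec ∧ x ∈ items := by
  rw [PySem.List.mem_sorted, PySem.Set.mem_inter, PySem.Set.mem_ofList]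

theorem pvPresentPairwise (items rec : List Int) :
    (PySem.List.sorted (PySem.Set.inter (PySem.Set.ofList rec) items) (fun x => x)).Pairwise (· < ·) := by
  have hle : (PySem.List.sorted (PySem.Set.inter (PySem.Set.ofList rec) items) (fun x => x)).Pairwise (· ≤ ·) :=
    PySem.List.sorted_pairwise _ _
  have hnd : (PySem.List.sorted (PySem.Set.inter (PySem.Set.ofList rec) items) (fun x => x)).Nodup :=
    (PySem.List.sorted_perm _ _ _).nodup_iff.mpr
      (PySem.Set.nodup_inter _ _ (PySem.Set.nodup_ofList rec))
  exact (hle.and hnd).imp (fun ⟨h1, h2⟩ => lt_of_le_of_ne h1 h2)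

theorem pvPySublistIff (t r : List Int) : pySublist t r = true ↔ ∀ x ∈ t, x ∈ r := by
  rw [pySublist, PySem.Set.issubset_iff]
  constructor
  · intro h x hx
    exact (PySem.Set.mem_ofList _ _).mp (h x ((PySem.Set.mem_ofList _ _).mpr hx))
  · intro h x hx
    exact (PySem.Set.mem_ofList _ _).mpr (h x ((PySem.Set.mem_ofList _ _).mp hx))

theorem pvMemComboPresentIff (items : List Int) (hit : items.Pairwise (· < ·))
    (t : List Int) (ht : t ∈ PySem.List.combinations items 3) (rec : List Int) :
    t ∈ PySem.List.combinations
        (PySem.List.sorted (PySem.Set.inter (PySem.Set.ofList rec) items) (fun x => x)) 3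
      ↔ pySublist t rec = true := by
  rcases (PySem.List.mem_combinations_iff _ _ _).mp ht with ⟨hsub, hlen⟩
  constructor
  · intro h
    rw [pvPySublistIff]
    intro x hx
    exact ((pvMemPresent items rec x).mp
      ((PySem.List.sublist_of_mem_combinations h).subset hx)).1
  · intro h
    rw [PySem.List.mem_combinations_iff]
    refine ⟨?_, hlen⟩
    apply pvSublistOfPairwiseLt _ _ (List.Pairwise.sublist hsub hit) (pvPresentPairwise items rec)
    intro x hx
    exact (pvMemPresent items rec x).mpr
      ⟨(pvPySublistIff t rec).mp h x hx, hsub.subset hx⟩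

theorem pvComboPresentMemTri (items : List Int) (hit : items.Pairwise (· < ·))
    (rec t : List Int)
    (h : t ∈ PySem.List.combinations
        (PySem.List.sorted (PySem.Set.inter (PySem.Set.ofList rec) items) (fun x => x)) 3) :
    t ∈ PySem.List.combinations items 3 := by
  rcases (PySem.List.mem_combinations_iff _ _ _).mp h with ⟨hsub, hlen⟩
  have hps : (PySem.List.sorted (PySem.Set.inter (PySem.Set.ofList rec) items) (fun x => x)).Sublist items := by
    apply pvSublistOfPairwiseLt _ _ (pvPresentPairwise items rec) hit
    intro x hx
    exact ((pvMemPresent items rec x).mp hx).2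
  exact (PySem.List.mem_combinations_iff _ _ _).mpr ⟨hsub.trans hps, hlen⟩

theorem pvSetUpdateEqSelf (s : PySem.Set (List Int)) (xs : List (List Int))
    (h : ∀ x ∈ xs, x ∈ s) : PySem.Set.update s xs = s := by
  rw [PySem.Set.update_eq_append_filter]
  have : (PySem.Set.ofList xs).filter (fun y => !PySem.Set.contains s y) = [] := by
    rw [List.filter_eq_nil_iff]
    intro y hy
    simp only [Bool.not_eq_true', Bool.not_eq_false]
    exact (PySem.Set.contains_iff _ _).mpr (h y ((PySem.Set.mem_ofList _ _).mp hy))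
  rw [this, List.append_nil]

-- B's record loop: keys stay the candidate triples
theorem pvBKeys (items : List Int) (hit : items.Pairwise (· < ·))
    (rs : List (List Int)) (d : PySem.Dict (List Int) Int)
    (hd : d.keys = PySem.Set.ofList (PySem.List.combinations items 3)) :
    (rs.foldl (fun d rec =>
      (PySem.List.combinations
          (PySem.List.sorted (PySem.Set.inter (PySem.Set.ofList rec) items) (fun x => x)) 3).foldl
        (fun d t => d.modify t 0 (fun v => v + 1)) d) d).keys
      = PySem.Set.ofList (PySem.List.combinations items 3) := by
  induction rs generalizing d with
  | nil => simpa using hd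
  | cons rec rs ih =>
    simp only [List.foldl_cons]
    apply ih
    rw [PySem.Dict.keys_foldl_modify, hd]
    apply pvSetUpdateEqSelf
    intro t hmem
    exact (PySem.Set.mem_ofList _ _).mpr (pvComboPresentMemTri items hit rec t hmem)

-- B's record loop: the count of a candidate triple t is the number of records containing it
theorem pvBGetD (items : List Int) (hit : items.Pairwise (· < ·))
    (t : List Int) (ht : t ∈ PySem.List.combinations items 3)
    (rs : List (List Int)) (d : PySem.Dict (List Int) Int) :
    (rs.foldl (fun d rec =>
      (PySem.List.combinations
          (PySem.List.sorted (PySem.Set.inter (PySem.Set.ofList rec) items) (fun x => x)) 3).foldl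
        (fun d t => d.modify t 0 (fun v => v + 1)) d) d).getD t 0
      = d.getD t 0 + (rs.countP (fun r => pySublist t r) : Int) := by
  induction rs generalizing d with
  | nil => simp
  | cons rec rs ih =>
    simp only [List.foldl_cons, ih]
    rw [PySem.Dict.getD_foldl_modify_add_one]
    have hnd : (PySem.List.combinations
        (PySem.List.sorted (PySem.Set.inter (PySem.Set.ofList rec) items) (fun x => x)) 3).Nodup :=
      pvCombinationsNodup _ 3 ((pvPresentPairwise items rec).imp (fun h => ne_of_lt h))
    have hcnt : (PySem.List.combinations
        (PySem.List.sorted (PySem.Set.inter (PySem.Set.ofList rec) items) (fun x => x)) 3).count t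
        = if pySublist t rec then 1 else 0 := by
      by_cases hm : t ∈ PySem.List.combinations
          (PySem.List.sorted (PySem.Set.inter (PySem.Set.ofList rec) items) (fun x => x)) 3
      · rw [List.count_eq_one_of_mem hnd hm,
          if_pos ((pvMemComboPresentIff items hit t ht rec).mp hm)]
      · rw [List.count_eq_zero_of_not_mem hm]
        rw [if_neg (fun hc => hm ((pvMemComboPresentIff items hit t ht rec).mpr hc))]
    rw [hcnt, List.countP_cons]
    by_cases hp : pySublist t rec
    · simp [hp]; ring
    · simp [hp]

-- the two support dictionaries coincide
theorem pvC3Eq (items : List Int) (hit : items.Pairwise (· < ·)) (records : List (List Int)) :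
    ((PySem.List.combinations items 3).foldl (fun c3 iter1 =>
        c3.insert iter1
          (records.foldl (fun count iter2 => if pySublist iter1 iter2 then count + 1 else count) (0 : Int)))
        PySem.Dict.empty)
      = records.foldl (fun d rec =>
          (PySem.List.combinations
              (PySem.List.sorted (PySem.Set.inter (PySem.Set.ofList rec) items) (fun x => x)) 3).foldl
            (fun d t => d.modify t 0 (fun v => v + 1)) d)
          ((PySem.List.combinations items 3).foldl (fun d t => d.insert t (0 : Int)) PySem.Dict.empty) := by
  have hkA : ((PySem.List.combinations items 3).foldl (fun c3 iter1 =>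
        c3.insert iter1
          (records.foldl (fun count iter2 => if pySublist iter1 iter2 then count + 1 else count) (0 : Int)))
        PySem.Dict.empty).keys = PySem.Set.ofList (PySem.List.combinations items 3) := by
    rw [PySem.Dict.keys_foldl_insert]
    simp [PySem.Set.update_nil_left]
  have hk0 : ((PySem.List.combinations items 3).foldl (fun d t => d.insert t (0 : Int))
        PySem.Dict.empty).keys = PySem.Set.ofList (PySem.List.combinations items 3) := by
    rw [PySem.Dict.keys_foldl_insert]
    simp [PySem.Set.update_nil_left]
  have hkB := pvBKeys items hit records _ hk0
  apply PySem.Dict.ext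
  rw [PySem.Dict.items_eq_map_keys _ (by rw [hkA]; exact PySem.Set.nodup_ofList _) 0,
      PySem.Dict.items_eq_map_keys _ (by rw [hkB]; exact PySem.Set.nodup_ofList _) 0,
      hkA, hkB]
  apply List.map_congr_left
  intro t htm
  have ht : t ∈ PySem.List.combinations items 3 := (PySem.Set.mem_ofList _ _).mp htm
  have hA := pvInsertFoldGetD (PySem.List.combinations items 3)
    (fun iter1 => records.foldl (fun count iter2 => if pySublist iter1 iter2 then count + 1 else count) (0 : Int))
    PySem.Dict.empty t
  have h0 := pvInsertFoldGetD (PySem.List.combinations items 3) (fun _ => (0 : Int))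
    PySem.Dict.empty t
  have hB := pvBGetD items hit t ht records
    ((PySem.List.combinations items 3).foldl (fun d t => d.insert t (0 : Int)) PySem.Dict.empty)
  rw [hA, hB, h0, if_pos ht, if_pos ht, PySem.List.foldl_count_if]

-- ===== VERDICT (by name: the statement is the Claim_ definition above) =====
theorem frequentSet_3_spec : Claim_equal_frequentSet_3 := by
  intro l2 records minimum_support_count _
  show frequentSet_3 l2 records minimum_support_count = frequentSet_3_alt l2 records minimum_support_count
  simp only [frequentSet_3, frequentSet_3_alt]
  have hit : (PySem.List.sorted (PySem.Set.ofList ((l2.map Prod.fst).flatMap (fun t => t))) (fun x => x)).Pairwise (· < ·) :=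
    PySem.List.sorted_ofList_pairwise_lt _
  by_cases h3 : 3 ≤ (PySem.List.sorted (PySem.Set.ofList ((l2.map Prod.fst).flatMap (fun t => t))) (fun x => x)).length
  case neg =>
    have hnil : PySem.List.combinations
        (PySem.List.sorted (PySem.Set.ofList ((l2.map Prod.fst).flatMap (fun t => t))) (fun x => x)) 3 = [] :=
      PySem.List.combinations_eq_nil_of_length_lt _ (Nat.lt_of_not_le h3)
    rw [if_neg h3, hnil]
    rfl
  rw [if_pos h3, ← pvC3Eq _ hit records]
  have hfun : (fun (l3 : PySem.Dict (List Int) Int) (kv : List Int × Int) =>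
      if kv.2 ≥ minimum_support_count then
        if checkSubsetFrequency kv.1 (List.map Prod.fst l2) 2 = true then l3.insert kv.1 kv.2 else l3
      else l3)
      = (fun (d : PySem.Dict (List Int) Int) (kv : List Int × Int) =>
      if (decide (kv.2 ≥ minimum_support_count)
          && (PySem.List.combinations kv.1 2).all fun p =>
            PySem.Set.contains (PySem.Set.ofList (List.map Prod.fst l2)) p) = true then
        d.insert kv.1 kv.2
      else d) := by
    funext d kv
    have hc : ∀ p : List Int, PySem.Set.contains (PySem.Set.ofList (l2.map Prod.fst)) p
        = (l2.map Prod.fst).contains p := by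
      intro p
      by_cases h : p ∈ l2.map Prod.fst
      · simp [h]
      · simp [h]
    by_cases h1 : kv.2 ≥ minimum_support_count
    · rw [if_pos h1]
      have hcond : (decide (kv.2 ≥ minimum_support_count) &&
          (PySem.List.combinations kv.1 2).all fun p =>
            PySem.Set.contains (PySem.Set.ofList (List.map Prod.fst l2)) p)
          = (PySem.List.combinations kv.1 2).all fun p => (List.map Prod.fst l2).contains p := by
        rw [decide_eq_true h1, Bool.true_and]
        simp only [hc]
      simp only [hcond, checkSubsetFrequency, show ((2 : Int)).toNat = 2 from rfl]
    · simp [h1]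
  rw [hfun]
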